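-- pv_equiv track=rewrite | github.com/vibeforge1111/spark-intelligence-builder | src/spark_intelligence/context/capsule.py | _extract_diagnostic_summary
-- ===== SOURCE A (Python) =====
-- def _extract_diagnostic_summary(text: str) -> dict[str, str]:
--     fields = {
--         "generated_at": ("generated_at:",),
--         "scanned_lines": ("scanned lines:", "Scanned:"),
--         "failure_lines": ("failure lines:", "Failure lines:", "Failures:"),
--         "finding_signatures": ("finding signatures:", "Findings:"),
--         "recurring_signatures": ("recurring signatures:",),
--     }
--     summary: dict[str, str] = {}
--     for raw_line in text.splitlines():
--         line = raw_line.strip().lstrip("-").strip()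
--         normalized = line.casefold()
--         for field, markers in fields.items():
--             if field in summary:
--                 continue
--             for marker in markers:
--                 if normalized.startswith(marker.casefold()):
--                     value = line[len(marker) :].strip()
--                     summary[field] = _strip_markdown_value(value)
--                     break
--     return summary
--
-- def _strip_markdown_value(value: str) -> str:
--     cleaned = value.strip()
--     if cleaned.startswith("`") and cleaned.endswith("`") and len(cleaned) >= 2:
--         cleaned = cleaned[1:-1].strip()
--     return cleaned
-- ===== SOURCE B (Python) =====
-- def _strip_markdown_value(value: str) -> str:
--     cleaned = value.strip()
--     if cleaned.startswith("`") and cleaned.endswith("`") and len(cleaned) >= 2: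
--         cleaned = cleaned[1:-1].strip()
--     return cleaned
--
--
-- def _extract_diagnostic_summary(text: str) -> dict[str, str]:
--     fields = {
--         "generated_at": ("generated_at:",),
--         "scanned_lines": ("scanned lines:", "Scanned:"),
--         "failure_lines": ("failure lines:", "Failure lines:", "Failures:"),
--         "finding_signatures": ("finding signatures:", "Findings:"),
--         "recurring_signatures": ("recurring signatures:",),
--     }
--     # clean every line once, keeping the original-cased text with its casefold
--     cleaned = [(line, line.casefold())
--                for line in (raw.strip().lstrip("-").strip() for raw in text.splitlines())]
--     # field-major: first matching line (and first matching marker on it) per field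
--     hits = []
--     for field, markers in fields.items():
--         hit = next(((i, line, marker)
--                     for i, (line, norm) in enumerate(cleaned)
--                     for marker in markers
--                     if norm.startswith(marker.casefold())), None)
--         if hit is not None:
--             i, line, marker = hit
--             hits.append((i, field, _strip_markdown_value(line[len(marker):].strip())))
--     # emit in text order (A's dict insertion order)
--     hits.sort(key=lambda h: h[0])
--     return {field: value for _, field, value in hits}
-- ===== Notes on version B (the rewrite author's own statement) =====
-- stated objective: alternative
-- what changed: B cleans all lines once, then searches field-major (first matching line per field via a single generator) instead of A's line-major triple-nested loop over the fields dict, and restores A's text-order dict by sorting the per-field hits by line index.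
import Mathlib
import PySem

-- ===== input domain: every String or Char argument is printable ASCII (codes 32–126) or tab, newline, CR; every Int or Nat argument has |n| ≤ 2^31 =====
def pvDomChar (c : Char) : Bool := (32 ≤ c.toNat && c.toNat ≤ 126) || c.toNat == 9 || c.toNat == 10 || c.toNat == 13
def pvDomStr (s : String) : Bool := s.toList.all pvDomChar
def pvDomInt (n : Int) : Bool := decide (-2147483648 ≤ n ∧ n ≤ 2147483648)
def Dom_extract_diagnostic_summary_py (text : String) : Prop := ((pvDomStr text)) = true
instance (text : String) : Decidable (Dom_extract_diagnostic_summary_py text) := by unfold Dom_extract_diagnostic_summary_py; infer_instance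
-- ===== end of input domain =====

-- B searches field-major over lines cleaned once (first matching line per field), then sorts
-- the hits by line index to restore A's text-order dict; alternative decomposition, same cost.

-- ===== PORT A =====
-- shared helper _strip_markdown_value (identical in both Pythons)
def pvStripMd (value : String) : String :=
  let cleaned := PySem.Str.strip value
  if PySem.Str.startswith cleaned "`" && PySem.Str.endswith cleaned "`"
      && decide ((2 : Int) ≤ PySem.Str.len cleaned) then
    PySem.Str.strip (PySem.Str.slice cleaned (some 1) (some (-1)))
  else cleaned

-- raw_line.strip().lstrip("-").strip(); lstrip("-") ported by hand as dropWhile '-' (exact)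
def pvClean (raw : String) : String :=
  PySem.Str.strip (String.ofList (((PySem.Str.strip raw).toList).dropWhile (fun c => c == '-')))

-- _strip_markdown_value(line[len(marker):].strip()) — identical expression in both Pythons
def pvValOf (line marker : String) : String :=
  pvStripMd (PySem.Str.strip (PySem.Str.slice line (some (PySem.Str.len marker)) none))

-- the literal fields dict (insertion order)
def pvFields : List (String × List String) :=
  [("generated_at", ["generated_at:"]),
   ("scanned_lines", ["scanned lines:", "Scanned:"]),
   ("failure_lines", ["failure lines:", "Failure lines:", "Failures:"]),
   ("finding_signatures", ["finding signatures:", "Findings:"]),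
   ("recurring_signatures", ["recurring signatures:"])]

-- A's innermost 'for marker in markers: … break' (casefold = lower: exact on the ASCII domain)
def pvFirstMarker (normalized : String) : List String → Option String
  | [] => none
  | m :: rest =>
      if PySem.Str.startswith normalized (PySem.Str.lower m) then some m
      else pvFirstMarker normalized rest

-- A's inner loop body over one (field, markers) entry
def pvStepF (line normalized : String) (summary : PySem.Dict String String)
    (fm : String × List String) : PySem.Dict String String :=
  if summary.contains fm.1 then summary
  else
    match pvFirstMarker normalized fm.2 with
    | some marker => summary.insert fm.1 (pvValOf line marker)
    | none => summary

def extract_diagnostic_summary_py (text : String) : List (String × String) :=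
  ((PySem.Str.splitlines text).foldl
    (fun (summary : PySem.Dict String String) raw_line =>
      let line := pvClean raw_line
      let normalized := PySem.Str.lower line
      pvFields.foldl (pvStepF line normalized) summary)
    PySem.Dict.empty).items

-- ===== PORT B =====
-- next(((i, line, marker) for i, (line, norm) in enumerate(cleaned) for marker in markers if …), None)
def pvFirstHit (markers : List String) : List (Int × String × String) → Option (Int × String × String)
  | [] => none
  | c :: rest =>
      match markers.find? (fun m => PySem.Str.startswith c.2.2 (PySem.Str.lower m)) with
      | some m => some (c.1, c.2.1, m)
      | none => pvFirstHit markers rest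

-- B's per-field loop body: append the first hit for this field, if any
def pvCollect (cs : List (Int × String × String)) (hits : List (Int × String × String))
    (fm : String × List String) : List (Int × String × String) :=
  match pvFirstHit fm.2 cs with
  | some h => hits ++ [(h.1, fm.1, pvValOf h.2.1 h.2.2)]
  | none => hits

def extract_diagnostic_summary_py_alt (text : String) : List (String × String) :=
  let cleaned := (PySem.Str.splitlines text).map
    (fun raw_line => let line := pvClean raw_line; (line, PySem.Str.lower line))
  let hits := pvFields.foldl (pvCollect (PySem.List.enumerate cleaned)) []
  (PySem.List.sorted hits (fun h => h.1) false).map (fun h => (h.2.1, h.2.2))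

-- ===== PRECONDITION & SPEC =====
def Spec_extract_diagnostic_summary_py (text : String) (out : List (String × String)) : Prop := out = extract_diagnostic_summary_py_alt text
instance (text : String) (out : List (String × String)) : Decidable (Spec_extract_diagnostic_summary_py text out) := by unfold Spec_extract_diagnostic_summary_py; infer_instance

-- ===== CLAIM (what is proved, stated in full; the proofs are below) =====
def Claim_equal_extract_diagnostic_summary_py : Prop := ∀ (text : String), Dom_extract_diagnostic_summary_py text → Spec_extract_diagnostic_summary_py text (extract_diagnostic_summary_py text)

-- ===== LEMMAS AND PROOFS =====

-- 'line matches marker' test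
def pvSW (norm m : String) : Bool := PySem.Str.startswith norm (PySem.Str.lower m)

def pvFlatOf (T : List (String × List String)) : List (String × String) :=
  T.flatMap (fun fm => fm.2.map (fun m => (fm.1, m)))

def pvFlat : List (String × String) := pvFlatOf pvFields

-- which (field, marker) a cleaned line hits first, scanning the flattened table
def pvClassify (norm : String) : Option (String × String) :=
  pvFlat.find? (fun p => pvSW norm p.2)

-- per-line step in classify form
def pvStepC (d : PySem.Dict String String) (c : String × String) : PySem.Dict String String :=
  match pvClassify c.2 with
  | some p => if d.contains p.1 then d else d.insert p.1 (pvValOf c.1 p.2)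
  | none => d

def pvHit (c : Int × String × String) : Option (Int × String × String) :=
  (pvClassify c.2.2).map (fun p => (c.1, p.1, pvValOf c.2.1 p.2))

-- keep the first entry per field, in list order
def pvSel (seen : List String) : List (Int × String × String) → List (Int × String × String)
  | [] => []
  | e :: rest => if seen.contains e.2.1 then pvSel seen rest
                 else e :: pvSel (e.2.1 :: seen) rest

-- two casefolded table markers in a prefix relation always belong to the same field
lemma pvPrefixUnique : ∀ p ∈ pvFlat, ∀ q ∈ pvFlat,
    ((PySem.Str.lower p.2).toList <+: (PySem.Str.lower q.2).toList) → p.1 = q.1 := by decide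

lemma pvFieldsNodup : (pvFields.map (fun fm => fm.1)).Nodup := by decide

-- matches on one line always name the same field
lemma pvMatchUnique (norm : String) : ∀ p ∈ pvFlat, ∀ q ∈ pvFlat,
    pvSW norm p.2 = true → pvSW norm q.2 = true → p.1 = q.1 := by
  intro p hp q hq hsp hsq
  have hp' : (PySem.Str.lower p.2).toList <+: norm.toList := by
    have := hsp; simp only [pvSW, PySem.Str.startswith_eq, PySem.Chars.startswith_iff] at this
    exact this
  have hq' : (PySem.Str.lower q.2).toList <+: norm.toList := by
    have := hsq; simp only [pvSW, PySem.Str.startswith_eq, PySem.Chars.startswith_iff] at this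
    exact this
  rcases List.prefix_or_prefix_of_prefix hp' hq' with h | h
  · exact pvPrefixUnique p hp q hq h
  · exact (pvPrefixUnique q hq p hp h).symm

-- (f, m) ∈ pvFlat with f the name of fm ∈ pvFields forces m ∈ fm.2 (field names are unique)
lemma pvMemFlat (fm : String × List String) (hfm : fm ∈ pvFields) (m : String)
    (h : (fm.1, m) ∈ pvFlat) : m ∈ fm.2 := by
  simp only [pvFlat, pvFlatOf, List.mem_flatMap, List.mem_map] at h
  rcases h with ⟨fm', hfm', m', hm', heq⟩
  rw [Prod.mk.injEq] at heq
  obtain ⟨h1, h2⟩ := heq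
  have : fm' = fm := List.inj_on_of_nodup_map pvFieldsNodup hfm' hfm h1
  subst this; rwa [h2] at hm'

lemma pvFlatOf_cons (fm : String × List String) (T : List (String × List String)) :
    pvFlatOf (fm :: T) = fm.2.map (fun m => (fm.1, m)) ++ pvFlatOf T := by
  simp [pvFlatOf]

-- the central bridge, generic form: if some marker of fm matches, the flattened scan
-- returns fm's field with fm's first matching marker
lemma pvFindFlat_some (norm : String) (T : List (String × List String))
    (hU : ∀ p ∈ pvFlatOf T, ∀ q ∈ pvFlatOf T, pvSW norm p.2 = true → pvSW norm q.2 = true → p.1 = q.1)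
    (hnd : (T.map (fun fm => fm.1)).Nodup)
    (fm : String × List String) (hfm : fm ∈ T) (m : String)
    (h : fm.2.find? (fun m => pvSW norm m) = some m) :
    (pvFlatOf T).find? (fun p => pvSW norm p.2) = some (fm.1, m) := by
  induction T with
  | nil => cases hfm
  | cons fm' rest ih =>
      rw [pvFlatOf_cons, List.find?_append]
      have hmm : m ∈ fm.2 := List.mem_of_find?_eq_some h
      have hsw : pvSW norm m = true := (List.find?_eq_some_iff_append.mp h).1
      rcases List.mem_cons.mp hfm with rfl | hfm'
      · have : (fm.2.map (fun m => (fm.1, m))).find? (fun p => pvSW norm p.2)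
            = some (fm.1, m) := by
          rw [List.find?_map]
          have : ((fun p => pvSW norm p.2) ∘ (fun m => ((fm.1, m) : String × String)))
              = fun m => pvSW norm m := rfl
          rw [this, h]; rfl
        rw [this]; rfl
      · have hne : fm'.1 ≠ fm.1 := by
          simp only [List.map_cons, List.nodup_cons] at hnd
          intro he
          exact hnd.1 (he ▸ List.mem_map_of_mem hfm')
        have hmemT : ((fm.1, m) : String × String) ∈ pvFlatOf (fm' :: rest) := by
          rw [pvFlatOf_cons]
          exact List.mem_append_right _ (by
            simp only [pvFlatOf, List.mem_flatMap, List.mem_map]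
            exact ⟨fm, hfm', m, hmm, rfl⟩)
        have hleft : (fm'.2.map (fun m => (fm'.1, m))).find? (fun p => pvSW norm p.2) = none := by
          rw [List.find?_eq_none]
          rintro ⟨f', m'⟩ hx hswx
          simp only [List.mem_map] at hx
          rcases hx with ⟨m'', hm'', he⟩
          rw [Prod.mk.injEq] at he
          obtain ⟨he1, he2⟩ := he
          have hmemL : ((f', m') : String × String) ∈ pvFlatOf (fm' :: rest) := by
            rw [pvFlatOf_cons]
            exact List.mem_append_left _ (by
              simp only [List.mem_map]
              exact ⟨m'', hm'', by rw [he1, he2]⟩)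
          have := hU _ hmemL _ hmemT hswx hsw
          simp only at this
          exact hne (he1.trans this)
        rw [hleft, Option.none_or]
        exact ih (fun p hp q hq => hU p (by rw [pvFlatOf_cons]; exact List.mem_append_right _ hp)
            q (by rw [pvFlatOf_cons]; exact List.mem_append_right _ hq))
          (by simp only [List.map_cons, List.nodup_cons] at hnd; exact hnd.2) hfm'

-- the central bridge: per-field first-marker search agrees with the flattened scan
lemma pvClassify_of_find_some (norm : String) (fm : String × List String) (hfm : fm ∈ pvFields)
    (m : String) (h : fm.2.find? (fun m => pvSW norm m) = some m) :
    pvClassify norm = some (fm.1, m) :=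
  pvFindFlat_some norm pvFields (pvMatchUnique norm) pvFieldsNodup fm hfm m h

lemma pvClassify_of_find_none (norm : String) (fm : String × List String) (hfm : fm ∈ pvFields)
    (h : fm.2.find? (fun m => pvSW norm m) = none) :
    ∀ m, pvClassify norm ≠ some (fm.1, m) := by
  intro m hc
  have hmem := List.mem_of_find?_eq_some hc
  have hsw : pvSW norm m = true := by
    have := List.find?_eq_some_iff_append.mp hc
    exact this.1
  have : m ∈ fm.2 := pvMemFlat fm hfm m hmem
  have := List.find?_eq_none.mp h m this
  exact this hsw

-- classify's field always is one of the table's fields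
lemma pvClassify_field_mem (norm : String) (p : String × String)
    (h : pvClassify norm = some p) : ∃ fm ∈ pvFields, fm.1 = p.1 ∧ p.2 ∈ fm.2 := by
  have hmem := List.mem_of_find?_eq_some h
  simp only [pvFlat, pvFlatOf, List.mem_flatMap, List.mem_map] at hmem
  rcases hmem with ⟨fm', hfm', m', hm', heq⟩
  subst heq
  exact ⟨fm', hfm', rfl, hm'⟩

-- ===== A-side: the nested field/marker loops are the classify step =====

lemma pvFirstMarker_eq_find? (norm : String) (ms : List String) :
    pvFirstMarker norm ms = ms.find? (fun m => pvSW norm m) := by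
  induction ms with
  | nil => rfl
  | cons m rest ih =>
      cases h : PySem.Str.startswith norm (PySem.Str.lower m) with
      | true => simp only [pvFirstMarker, List.find?_cons, pvSW, h, if_true]
      | false => simp only [pvFirstMarker, List.find?_cons, pvSW, h, if_false, ih,
                   Bool.false_eq_true]

lemma pvFoldF_none (line norm : String) (T : List (String × List String))
    (h : ∀ fm ∈ T, fm.2.find? (fun m => pvSW norm m) = none) (d : PySem.Dict String String) :
    T.foldl (pvStepF line norm) d = d := by
  induction T generalizing d with
  | nil => rfl
  | cons fm rest ih =>
      have hstep : pvStepF line norm d fm = d := by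
        unfold pvStepF
        rw [pvFirstMarker_eq_find?, h fm (by simp)]
        split_ifs <;> rfl
      simp only [List.foldl_cons, hstep]
      exact ih (fun fm' h' => h fm' (by simp [h'])) d

-- when the flattened scan hits (f, mv), the per-field searches are determined
lemma pvFind_of_classify_some (norm : String) (p : String × String)
    (hc : pvClassify norm = some p) (fm : String × List String) (hfm : fm ∈ pvFields) :
    fm.2.find? (fun m => pvSW norm m) = (if fm.1 = p.1 then some p.2 else none) := by
  split_ifs with hf
  · have hmem := List.mem_of_find?_eq_some hc
    have hsw : pvSW norm p.2 = true := (List.find?_eq_some_iff_append.mp hc).1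
    have hpair : ((fm.1, p.2) : String × String) = p := by
      rw [Prod.ext_iff]; exact ⟨hf, rfl⟩
    have hp2 : p.2 ∈ fm.2 := pvMemFlat fm hfm p.2 (hpair.symm ▸ hmem)
    have hsome : (fm.2.find? (fun m => pvSW norm m)).isSome := by
      rw [List.find?_isSome]
      exact ⟨p.2, hp2, hsw⟩
    rcases Option.isSome_iff_exists.mp hsome with ⟨m', hm'⟩
    have hcls := pvClassify_of_find_some norm fm hfm m' hm'
    rw [hc] at hcls
    have h2 : p.2 = m' := (Prod.ext_iff.mp (Option.some.inj hcls)).2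
    rw [hm', h2]
  · rw [List.find?_eq_none]
    intro m hm hswm
    have hsome : (fm.2.find? (fun m => pvSW norm m)).isSome := by
      rw [List.find?_isSome]; exact ⟨m, hm, hswm⟩
    rcases Option.isSome_iff_exists.mp hsome with ⟨m'', hm''⟩
    have hcls := pvClassify_of_find_some norm fm hfm m'' hm''
    rw [hc] at hcls
    exact hf (Prod.ext_iff.mp (Option.some.inj hcls).symm).1

lemma pvFoldF_some_gen (line norm : String) (T : List (String × List String)) (f mv : String)
    (hnd : (T.map (fun fm => fm.1)).Nodup) (hf : f ∈ T.map (fun fm => fm.1))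
    (h : ∀ fm ∈ T, fm.2.find? (fun m => pvSW norm m) = (if fm.1 = f then some mv else none))
    (d : PySem.Dict String String) :
    T.foldl (pvStepF line norm) d = if d.contains f then d else d.insert f (pvValOf line mv) := by
  induction T generalizing d with
  | nil => cases hf
  | cons fm' rest ih =>
      simp only [List.foldl_cons]
      by_cases hhead : fm'.1 = f
      · have hfind : fm'.2.find? (fun m => pvSW norm m) = some mv := by
          rw [h fm' (by simp), if_pos hhead]
        have hrest : ∀ fm ∈ rest, fm.2.find? (fun m => pvSW norm m) = none := by
          intro fm hfm
          rw [h fm (by simp [hfm]), if_neg]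
          intro he
          simp only [List.map_cons, List.nodup_cons] at hnd
          exact hnd.1 (by rw [hhead]; exact List.mem_map.mpr ⟨fm, hfm, he⟩)
        have hstep : pvStepF line norm d fm'
            = if d.contains f then d else d.insert f (pvValOf line mv) := by
          unfold pvStepF
          rw [pvFirstMarker_eq_find?, hfind, hhead]
        rw [hstep, pvFoldF_none line norm rest hrest]
      · have hfind : fm'.2.find? (fun m => pvSW norm m) = none := by
          rw [h fm' (by simp), if_neg hhead]
        have hstep : pvStepF line norm d fm' = d := by
          unfold pvStepF
          rw [pvFirstMarker_eq_find?, hfind]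
          split_ifs <;> rfl
        rw [hstep]
        refine ih (by simp only [List.map_cons, List.nodup_cons] at hnd; exact hnd.2) ?_
          (fun fm hfm => h fm (by simp [hfm])) d
        rcases List.mem_map.mp hf with ⟨fm'', hfm'', he⟩
        rcases List.mem_cons.mp hfm'' with rfl | hr
        · exact absurd he hhead
        · exact List.mem_map.mpr ⟨fm'', hr, he⟩

lemma pvFoldF_eq (line norm : String) (d : PySem.Dict String String) :
    pvFields.foldl (pvStepF line norm) d = pvStepC d (line, norm) := by
  unfold pvStepC
  cases hc : pvClassify norm with
  | none =>
      apply pvFoldF_none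
      intro fm hfm
      rw [List.find?_eq_none]
      intro m hm hswm
      have hsome : (fm.2.find? (fun m => pvSW norm m)).isSome := by
        rw [List.find?_isSome]; exact ⟨m, hm, hswm⟩
      rcases Option.isSome_iff_exists.mp hsome with ⟨m'', hm''⟩
      have hcls := pvClassify_of_find_some norm fm hfm m'' hm''
      rw [hc] at hcls; cases hcls
  | some p =>
      rcases pvClassify_field_mem norm p hc with ⟨fm, hfm, hf1, hp2⟩
      exact pvFoldF_some_gen line norm pvFields p.1 p.2 pvFieldsNodup
        (hf1 ▸ List.mem_map_of_mem hfm)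
        (fun fm' hfm' => pvFind_of_classify_some norm p hc fm' hfm') d

-- ===== A characterized: items = first-per-field selection over classified lines =====

lemma pvSel_congr (l : List (Int × String × String)) (s₁ s₂ : List String)
    (h : ∀ x, x ∈ s₁ ↔ x ∈ s₂) : pvSel s₁ l = pvSel s₂ l := by
  induction l generalizing s₁ s₂ with
  | nil => rfl
  | cons e rest ih =>
      have hc : s₁.contains e.2.1 = s₂.contains e.2.1 := by
        by_cases hm : e.2.1 ∈ s₁
        · have hm2 := (h _).mp hm
          simp [hm, hm2]
        · have hm2 : e.2.1 ∉ s₂ := fun hx => hm ((h _).mpr hx)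
          simp [hm, hm2]
      simp only [pvSel, hc]
      split_ifs with hifc
      · exact ih s₁ s₂ h
      · rw [ih (e.2.1 :: s₁) (e.2.1 :: s₂) (by intro x; simp [h x])]

lemma pvCanonItems (cs : List (Int × String × String)) (d : PySem.Dict String String) :
    (cs.foldl (fun d c => pvStepC d c.2) d).items
      = d.items ++ (pvSel d.keys (cs.filterMap pvHit)).map (fun e => (e.2.1, e.2.2)) := by
  induction cs generalizing d with
  | nil => simp [pvSel]
  | cons c rest ih =>
      simp only [List.foldl_cons, List.filterMap_cons]
      cases hc : pvClassify c.2.2 with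
      | none =>
          have hhit : pvHit c = none := by simp [pvHit, hc]
          have hstep : pvStepC d c.2 = d := by unfold pvStepC; rw [hc]
          rw [hhit, hstep, ih]
      | some p =>
          have hhit : pvHit c = some (c.1, p.1, pvValOf c.2.1 p.2) := by simp [pvHit, hc]
          rw [hhit]
          by_cases hcon : d.contains p.1 = true
          · have hstep : pvStepC d c.2 = d := by unfold pvStepC; rw [hc]; simp [hcon]
            have hkeys : d.keys.contains p.1 = true :=
              List.contains_iff_mem.mpr ((PySem.Dict.contains_iff_mem_keys d p.1).mp hcon)
            rw [hstep, ih]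
            simp only [pvSel, hkeys, if_true]
          · have hcon' : d.contains p.1 = false := by
              cases h : d.contains p.1
              · rfl
              · exact absurd h hcon
            have hstep : pvStepC d c.2 = d.insert p.1 (pvValOf c.2.1 p.2) := by
              unfold pvStepC; rw [hc]; simp [hcon']
            have hkeys : d.keys.contains p.1 = false := by
              cases h : d.keys.contains p.1
              · rfl
              · exact absurd ((PySem.Dict.contains_iff_mem_keys d p.1).mpr
                  (List.contains_iff_mem.mp h)) hcon
            rw [hstep, ih]
            rw [PySem.Dict.items_insert_of_not_contains d _ hcon',
              PySem.Dict.keys_insert_of_not_contains d _ hcon']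
            have hsel : pvSel d.keys ((c.1, p.1, pvValOf c.2.1 p.2) :: rest.filterMap pvHit)
                = (c.1, p.1, pvValOf c.2.1 p.2) :: pvSel (p.1 :: d.keys) (rest.filterMap pvHit) := by
              simp only [pvSel, hkeys]
              rw [if_neg (by simp)]
            rw [hsel]
            rw [pvSel_congr (rest.filterMap pvHit) (d.keys ++ [p.1]) (p.1 :: d.keys)
              (by intro x; simp [or_comm])]
            simp

-- ===== B-side =====

lemma pvCollect_fold (cs : List (Int × String × String)) (l : List (String × List String))
    (acc : List (Int × String × String)) :
    l.foldl (pvCollect cs) acc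
      = acc ++ l.filterMap (fun fm =>
          (pvFirstHit fm.2 cs).map
            (fun h => ((h.1, fm.1, pvValOf h.2.1 h.2.2) : Int × String × String))) := by
  induction l generalizing acc with
  | nil => simp
  | cons fm rest ih =>
      simp only [List.foldl_cons, List.filterMap_cons, pvCollect]
      cases hg : pvFirstHit fm.2 cs with
      | none => simp [ih]
      | some y => simp [ih]

-- per field, the field-major scan finds the first classified line of that field
lemma pvFirstHit_eq (fm : String × List String) (hfm : fm ∈ pvFields)
    (cs : List (Int × String × String)) :
    (pvFirstHit fm.2 cs).map (fun h => ((h.1, fm.1, pvValOf h.2.1 h.2.2) : Int × String × String))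
      = (cs.filterMap pvHit).find? (fun e => e.2.1 == fm.1) := by
  induction cs with
  | nil => rfl
  | cons c rest ih =>
      have hfh : pvFirstHit fm.2 (c :: rest)
          = match fm.2.find? (fun m => pvSW c.2.2 m) with
            | some m => some (c.1, c.2.1, m)
            | none => pvFirstHit fm.2 rest := rfl
      rw [List.filterMap_cons, hfh]
      cases hr : fm.2.find? (fun m => pvSW c.2.2 m) with
      | some m =>
          have hcls : pvClassify c.2.2 = some (fm.1, m) :=
            pvClassify_of_find_some c.2.2 fm hfm m hr
          have hhit : pvHit c = some (c.1, fm.1, pvValOf c.2.1 m) := by simp [pvHit, hcls]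
          rw [hhit, List.find?_cons]
          simp
      | none =>
          cases hcl : pvClassify c.2.2 with
          | none =>
              have hhit : pvHit c = none := by simp [pvHit, hcl]
              rw [hhit]
              exact ih
          | some p =>
              have hhit : pvHit c = some (c.1, p.1, pvValOf c.2.1 p.2) := by
                simp [pvHit, hcl]
              have hne : p.1 ≠ fm.1 := by
                intro he
                apply pvClassify_of_find_none c.2.2 fm hfm hr p.2
                rw [hcl]
                exact congrArg some (by rw [Prod.ext_iff]; exact ⟨he, rfl⟩)
              rw [hhit, List.find?_cons]
              have : (((c.1, p.1, pvValOf c.2.1 p.2) : Int × String × String).2.1 == fm.1)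
                  = false := by
                simp [hne]
              rw [this]
              exact ih

lemma pvSel_sublist (seen : List String) (l : List (Int × String × String)) :
    (pvSel seen l).Sublist l := by
  induction l generalizing seen with
  | nil => simp [pvSel]
  | cons e rest ih =>
      simp only [pvSel]
      split_ifs
      · exact (ih seen).trans (List.sublist_cons_self e rest)
      · exact (ih (e.2.1 :: seen)).cons₂ e

lemma pvMemSel (l : List (Int × String × String)) (seen : List String)
    (e : Int × String × String) :
    e ∈ pvSel seen l ↔ l.find? (fun x => x.2.1 == e.2.1) = some e ∧ e.2.1 ∉ seen := by
  induction l generalizing seen with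
  | nil => simp [pvSel]
  | cons x rest ih =>
      simp only [pvSel]
      by_cases hx : x.2.1 ∈ seen
      · rw [if_pos (List.contains_iff_mem.mpr hx), ih, List.find?_cons]
        constructor
        · rintro ⟨hfind, hns⟩
          have hne : (x.2.1 == e.2.1) = false := by
            simp only [beq_eq_false_iff_ne, ne_eq]
            intro he; exact hns (he ▸ hx)
          rw [hne]
          exact ⟨hfind, hns⟩
        · rintro ⟨hfind, hns⟩
          have hne : (x.2.1 == e.2.1) = false := by
            simp only [beq_eq_false_iff_ne, ne_eq]
            intro he; exact hns (he ▸ hx)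
          rw [hne] at hfind
          exact ⟨hfind, hns⟩
      · rw [if_neg (by simp [hx]), List.mem_cons, ih, List.find?_cons]
        constructor
        · rintro (rfl | ⟨hfind, hns⟩)
          · exact ⟨by simp, hx⟩
          · have hne' : (x.2.1 == e.2.1) = false := by
              simp only [beq_eq_false_iff_ne, ne_eq]
              intro he; exact hns (by simp [← he])
            rw [hne']
            exact ⟨hfind, fun hse => hns (by simp [hse])⟩
        · rintro ⟨hfind, hns⟩
          cases hxe : (x.2.1 == e.2.1) with
          | true =>
              rw [hxe] at hfind
              simp only at hfind
              left
              exact (Option.some.inj hfind).symm ▸ rfl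
          | false =>
              rw [hxe] at hfind
              simp only at hfind
              right
              refine ⟨hfind, fun hse => ?_⟩
              rcases List.mem_cons.mp hse with he | hse'
              · rw [he] at hxe
                simp at hxe
              · exact hns hse'

lemma pvHit_fst (c : Int × String × String) (e : Int × String × String)
    (h : pvHit c = some e) : e.1 = c.1 := by
  unfold pvHit at h
  cases hc : pvClassify c.2.2 with
  | none => rw [hc] at h; cases h
  | some p =>
      rw [hc] at h
      simp only [Option.map_some] at h
      rw [← Option.some.inj h]

-- the cleaned lines with their casefolds, and the classified hits, as both ports see them
def pvCleaned (text : String) : List (String × String) :=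
  (PySem.Str.splitlines text).map (fun raw => (pvClean raw, PySem.Str.lower (pvClean raw)))

def pvHits (text : String) : List (Int × String × String) :=
  (PySem.List.enumerate (pvCleaned text)).filterMap pvHit

set_option maxHeartbeats 1000000 in
lemma pvAChar (text : String) :
    extract_diagnostic_summary_py text
      = (pvSel [] (pvHits text)).map (fun e => (e.2.1, e.2.2)) := by
  have h3 : List.foldl (fun d raw => pvStepC d (pvClean raw, PySem.Str.lower (pvClean raw)))
        PySem.Dict.empty (PySem.Str.splitlines text)
      = List.foldl pvStepC PySem.Dict.empty (pvCleaned text) := by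
    unfold pvCleaned
    rw [List.foldl_map]
  have h4 : List.foldl pvStepC PySem.Dict.empty (pvCleaned text)
      = List.foldl (fun d c => pvStepC d c.2) PySem.Dict.empty
          (PySem.List.enumerate (pvCleaned text) 0) := by
    conv_lhs => rw [← PySem.List.map_snd_enumerate (pvCleaned text) 0]
    rw [List.foldl_map]
  show ((PySem.Str.splitlines text).foldl
      (fun (summary : PySem.Dict String String) raw_line =>
        pvFields.foldl (pvStepF (pvClean raw_line) (PySem.Str.lower (pvClean raw_line))) summary)
      PySem.Dict.empty).items = _
  rw [PySem.List.foldl_congr_mem (PySem.Str.splitlines text)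
    (fun (summary : PySem.Dict String String) raw_line =>
      pvFields.foldl (pvStepF (pvClean raw_line) (PySem.Str.lower (pvClean raw_line))) summary)
    (fun d raw => pvStepC d (pvClean raw, PySem.Str.lower (pvClean raw)))
    PySem.Dict.empty
    (fun d raw _ => pvFoldF_eq (pvClean raw) (PySem.Str.lower (pvClean raw)) d)]
  rw [h3, h4, pvCanonItems]
  rfl

set_option maxHeartbeats 1000000 in
lemma pvBChar (text : String) :
    extract_diagnostic_summary_py_alt text
      = (pvSel [] (pvHits text)).map (fun e => (e.2.1, e.2.2)) := by
  show (PySem.List.sorted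
      (pvFields.foldl (pvCollect (PySem.List.enumerate (pvCleaned text))) [])
      (fun h => h.1) false).map (fun h => (h.2.1, h.2.2)) = _
  rw [pvCollect_fold, List.nil_append, List.filterMap_congr (g := fun fm => (pvHits text).find? (fun e => e.2.1 == fm.1))
    (fun fm hfm => pvFirstHit_eq fm hfm (PySem.List.enumerate (pvCleaned text)))]
  have hHpair : (pvHits text).Pairwise (fun a b => a.1 < b.1) := by
    unfold pvHits
    refine List.pairwise_filterMap.mpr ?_
    refine (PySem.List.pairwise_lt_enumerate (pvCleaned text) 0).imp ?_
    intro a b hab e he e' he'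
    rw [pvHit_fst a e he, pvHit_fst b e' he']
    exact hab
  have hKpair : (pvSel [] (pvHits text)).Pairwise (fun a b => a.1 < b.1) :=
    List.Pairwise.sublist (pvSel_sublist [] (pvHits text)) hHpair
  have hKnodup : (pvSel [] (pvHits text)).Nodup :=
    hKpair.imp (fun {a b} hab he => by rw [he] at hab; exact lt_irrefl _ hab)
  have hfield : ∀ (fm : String × List String) (e : Int × String × String),
      (pvHits text).find? (fun x => x.2.1 == fm.1) = some e → e.2.1 = fm.1 := by
    intro fm e h
    have := (List.find?_eq_some_iff_append.mp h).1
    exact beq_iff_eq.mp this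
  have hhitsNodup : (pvFields.filterMap
      (fun fm => (pvHits text).find? (fun e => e.2.1 == fm.1))).Nodup := by
    refine List.pairwise_filterMap.mpr ?_
    have hp : pvFields.Pairwise (fun a b => a.1 ≠ b.1) :=
      List.pairwise_map.mp pvFieldsNodup
    refine hp.imp ?_
    intro a b hab e he e' he' hee
    exact hab (by rw [← hfield a e he, ← hfield b e' he', hee])
  have hmem : ∀ e, e ∈ pvFields.filterMap
      (fun fm => (pvHits text).find? (fun x => x.2.1 == fm.1))
      ↔ e ∈ pvSel [] (pvHits text) := by
    intro e
    constructor
    · intro h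
      rcases List.mem_filterMap.mp h with ⟨fm, hfm, hfind⟩
      have hf := hfield fm e hfind
      rw [pvMemSel]
      refine ⟨?_, by simp⟩
      simp only [hf]
      exact hfind
    · intro h
      rcases (pvMemSel (pvHits text) [] e).mp h with ⟨hfind, -⟩
      have heH : e ∈ pvHits text := List.mem_of_find?_eq_some hfind
      rcases List.mem_filterMap.mp heH with ⟨c, hcm, hhit⟩
      unfold pvHit at hhit
      cases hc : pvClassify c.2.2 with
      | none => rw [hc] at hhit; cases hhit
      | some p =>
          rw [hc] at hhit
          simp only [Option.map_some] at hhit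
          rcases pvClassify_field_mem c.2.2 p hc with ⟨fm, hfm, hf1, -⟩
          have he21 : e.2.1 = fm.1 := by
            rw [← Option.some.inj hhit]
            exact hf1.symm
          refine List.mem_filterMap.mpr ⟨fm, hfm, ?_⟩
          simp only [← he21]
          exact hfind
  have hperm : (pvSel [] (pvHits text)).Perm
      (pvFields.filterMap (fun fm => (pvHits text).find? (fun e => e.2.1 == fm.1))) :=
    (List.perm_ext_iff_of_nodup hKnodup hhitsNodup).mpr (fun a => (hmem a).symm)
  rw [PySem.List.sorted_eq_of_perm_of_pairwise_lt _ _ (fun h => h.1) hperm hKpair]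

-- ===== VERDICT (by name: the statement is the Claim_ definition above) =====
theorem extract_diagnostic_summary_py_spec : Claim_equal_extract_diagnostic_summary_py := by
  intro text _
  unfold Spec_extract_diagnostic_summary_py
  rw [pvAChar text, pvBChar text]
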